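-- pv_equiv track=rewrite | github.com/abdelfattah-lab/SplitReason | study_offloading.py | get_bigmodel_mask
-- ===== SOURCE A (Python) =====
-- from typing import List
--
-- def get_bigmodel_mask(text: str, open_tag: str = "<bigmodel>", close_tag: str = "</bigmodel>") -> List[int]:
--     """Return a 0/1 mask marking characters inside <bigmodel>…</bigmodel>."""
--
--     mask = [0] * len(text)
--     start_index = 0
--
--     while True:
--         open_pos = text.find(open_tag, start_index)
--         if open_pos == -1:
--             break  # no more openings
--
--         close_pos = text.find(close_tag, open_pos + len(open_tag))
--         if close_pos == -1:
--             # If we can't find a close tag, mark until the end of the text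
--             for i in range(open_pos, len(text)):
--                 mask[i] = 1
--             break
--         else:
--             # Mark the region from <bigmodel> ... </bigmodel>
--             region_end = close_pos + len(close_tag)
--             for i in range(open_pos, region_end):
--                 mask[i] = 1
--             start_index = region_end
--
--     return mask
-- ===== SOURCE B (Python) =====
-- from typing import List
--
-- def get_bigmodel_mask(text: str, open_tag: str = "<bigmodel>", close_tag: str = "</bigmodel>") -> List[int]:
--     """Return a 0/1 mask marking characters inside <bigmodel>…</bigmodel>.
--
--     Precompute all occurrence positions of both tags up front, then merge the
--     two sorted position lists with a single pass to paint the mask regions."""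
--     n = len(text)
--     opens = [i for i in range(n + 1) if text.startswith(open_tag, i)]
--     closes = [i for i in range(n + 1) if text.startswith(close_tag, i)]
--     mask = [0] * n
--     cur = 0
--     for o in opens:
--         if o < cur:
--             continue
--         while closes and closes[0] < o + len(open_tag):
--             closes.pop(0)
--         if not closes:
--             mask[o:n] = [1] * (n - o)
--             break
--         cur = closes[0] + len(close_tag)
--         mask[o:cur] = [1] * (cur - o)
--     return mask
-- ===== Notes on version B (the rewrite author's own statement) =====
-- stated objective: alternative
-- what changed: B precomputes the sorted lists of all occurrence positions of both tags once and paints the mask by merging the two position lists in one pass with slice assignments, instead of A's while-loop of interleaved str.find calls with per-character mask writes; Pre_ excludes only the degenerate case where both tags are empty strings, on which A's while-loop never terminates.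
import Mathlib
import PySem

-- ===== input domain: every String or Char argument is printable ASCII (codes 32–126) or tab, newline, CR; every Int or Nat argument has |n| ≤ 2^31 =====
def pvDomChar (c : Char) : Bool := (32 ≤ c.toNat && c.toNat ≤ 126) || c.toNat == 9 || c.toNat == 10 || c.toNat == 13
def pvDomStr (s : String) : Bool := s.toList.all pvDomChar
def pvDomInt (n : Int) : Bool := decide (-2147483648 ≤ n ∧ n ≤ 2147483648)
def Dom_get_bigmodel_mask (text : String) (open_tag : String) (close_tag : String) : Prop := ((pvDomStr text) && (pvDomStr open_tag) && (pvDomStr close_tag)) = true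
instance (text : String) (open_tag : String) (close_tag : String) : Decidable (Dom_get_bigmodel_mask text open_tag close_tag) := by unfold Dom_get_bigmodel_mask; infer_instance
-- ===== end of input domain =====

-- B replaces A's interleaved str.find while-loop by precomputing both tags' occurrence-position
-- lists once and merging them in one pass (objective: alternative structure, same cost).

-- ===== PORT A =====
-- 'for i in range(a, b): mask[i] = 1' — every visited index is nonnegative and < len(mask)
-- whenever A reaches this loop, so '.set i.toNat' is exact here
def pvMarkA (mask : List Int) (a b : Int) : List Int :=
  (PySem.List.pyRange a b).foldl (fun m i => m.set i.toNat 1) mask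

-- A's 'while True' loop, with fuel; fuel = len(text)+1 suffices whenever the two tags are not
-- both empty (Pre_), because each continuing iteration strictly increases start_index: the
-- fuel-0 branch is never reached under Pre_ (on open_tag = close_tag = '' the Python diverges)
def pvLoopA (t otag ctag : List Char) : Nat → Int → List Int → List Int
  | 0, _, mask => mask
  | fuel + 1, s, mask =>
    let op := PySem.Chars.findFrom t otag s        -- open_pos = text.find(open_tag, start_index)
    if op = -1 then mask
    else
      let cp := PySem.Chars.findFrom t ctag (op + (otag.length : Int))
      if cp = -1 then pvMarkA mask op (t.length : Int)
      else pvLoopA t otag ctag fuel (cp + (ctag.length : Int))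
             (pvMarkA mask op (cp + (ctag.length : Int)))

def get_bigmodel_mask (text : String) (open_tag : String) (close_tag : String) : List Int :=
  pvLoopA text.toList open_tag.toList close_tag.toList (text.toList.length + 1) 0
    (List.replicate text.toList.length 0)

-- ===== PORT B =====
-- [i for i in range(n+1) if text.startswith(tag, i)] — text.startswith(tag, i) with
-- 0 ≤ i ≤ len(text) is exactly text[i:].startswith(tag)
def pvOcc (t tag : List Char) : List Nat :=
  (List.range (t.length + 1)).filter (fun i => PySem.Chars.startswith (List.drop i t) tag)

-- 'mask[a:b] = [1]*(b-a)' — B only uses it with 0 ≤ a ≤ b ≤ len(mask), where this is exact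
def pvSetSlice (mask : List Int) (a b : Nat) : List Int :=
  mask.take a ++ List.replicate (b - a) 1 ++ mask.drop b

-- 'for o in opens: …' with the leading 'closes.pop(0)' while-loop rendered as dropWhile
def pvLoopB (olen clen n : Nat) : List Nat → List Nat → Nat → List Int → List Int
  | [], _, _, mask => mask
  | o :: os, closes, cur, mask =>
    if o < cur then pvLoopB olen clen n os closes cur mask      -- continue
    else
      match closes.dropWhile (fun c => decide (c < o + olen)) with
      | [] => pvSetSlice mask o n                               -- break
      | c :: cs => pvLoopB olen clen n os (c :: cs) (c + clen) (pvSetSlice mask o (c + clen))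

def get_bigmodel_mask_alt (text : String) (open_tag : String) (close_tag : String) : List Int :=
  pvLoopB open_tag.toList.length close_tag.toList.length text.toList.length
    (pvOcc text.toList open_tag.toList) (pvOcc text.toList close_tag.toList) 0
    (List.replicate text.toList.length 0)

-- ===== PRECONDITION & SPEC =====
-- Pre_ excludes only the case where both tags are empty strings, on which A never terminates
def Pre_get_bigmodel_mask (_text : String) (open_tag : String) (close_tag : String) : Prop :=
  open_tag ≠ "" ∨ close_tag ≠ ""
instance (text : String) (open_tag : String) (close_tag : String) : Decidable (Pre_get_bigmodel_mask text open_tag close_tag) := by unfold Pre_get_bigmodel_mask; infer_instance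

def pvWitness_get_bigmodel_mask : String × String × String := ("x<b>y</b>z", "<b>", "</b>")

def Spec_get_bigmodel_mask (text : String) (open_tag : String) (close_tag : String) (out : List Int) : Prop := out = get_bigmodel_mask_alt text open_tag close_tag
instance (text : String) (open_tag : String) (close_tag : String) (out : List Int) : Decidable (Spec_get_bigmodel_mask text open_tag close_tag out) := by unfold Spec_get_bigmodel_mask; infer_instance

-- ===== CLAIM (what is proved, stated in full; the proofs are below) =====
def Claim_equal_get_bigmodel_mask : Prop := ∀ (text : String) (open_tag : String) (close_tag : String), Dom_get_bigmodel_mask text open_tag close_tag → Pre_get_bigmodel_mask text open_tag close_tag → Spec_get_bigmodel_mask text open_tag close_tag (get_bigmodel_mask text open_tag close_tag)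

-- ===== LEMMAS AND PROOFS =====

lemma pvOcc_mem (t tag : List Char) (i : Nat) :
    i ∈ pvOcc t tag ↔ i ≤ t.length ∧ tag <+: List.drop i t := by
  simp [pvOcc, List.mem_filter, List.mem_range,
    PySem.Chars.startswith_iff, and_comm]

lemma pvOcc_sorted (t tag : List Char) : (pvOcc t tag).Pairwise (· < ·) :=
  List.Pairwise.filter _ List.pairwise_lt_range

lemma pvOcc_nodup (t tag : List Char) : (pvOcc t tag).Nodup :=
  (pvOcc_sorted t tag).imp Nat.ne_of_lt

lemma pvOcc_le (t tag : List Char) {i : Nat} (h : i ∈ pvOcc t tag) :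
    i + tag.length ≤ t.length := by
  rcases (pvOcc_mem t tag i).1 h with ⟨hle, hpre⟩
  have := hpre.length_le
  simp [List.length_drop] at this
  omega

-- a suffix of L whose dropped elements all satisfy p has the same dropWhile p as L
lemma pvDropWhile_suffix_eq {l L : List Nat} (p : Nat → Bool) (hsuf : l <:+ L)
    (hnd : L.Nodup) (hout : ∀ y ∈ L, y ∉ l → p y = true) :
    L.dropWhile p = l.dropWhile p := by
  rcases hsuf with ⟨pre, rfl⟩
  have hdis := (List.nodup_append.1 hnd).2.2
  have hpre : List.dropWhile p pre = [] := by
    rw [List.dropWhile_eq_nil_iff]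
    intro x hx
    exact hout x (List.mem_append_left _ hx) (fun hxl => hdis x hx x hxl rfl)
  rw [List.dropWhile_append, hpre]
  simp

-- text.find(tag, k) = -1  ↔  no occurrence position ≥ k  (0 ≤ k ≤ len(text))
lemma pvFind_eq_neg_one (t tag : List Char) (k : Nat) (hk : k ≤ t.length) :
    PySem.Chars.findFrom t tag (k : Int) = -1 ↔
      (pvOcc t tag).dropWhile (fun x => decide (x < k)) = [] := by
  rw [PySem.Chars.findFrom_natCast_eq_neg_one_iff t tag k hk, List.dropWhile_eq_nil_iff]
  constructor
  · intro hno x hx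
    by_contra hlt
    simp at hlt
    apply hno
    rw [← PySem.Chars.isIn_iff_infix, ← PySem.Chars.exists_prefix_drop_iff_isIn]
    rcases (pvOcc_mem t tag x).1 hx with ⟨_, hpre⟩
    exact ⟨x - k, by rwa [List.drop_drop, Nat.add_sub_cancel' hlt]⟩
  · intro hall hinf
    rw [← PySem.Chars.isIn_iff_infix, ← PySem.Chars.exists_prefix_drop_iff_isIn] at hinf
    rcases hinf with ⟨j, hj⟩
    rw [List.drop_drop] at hj
    by_cases hle : k + j ≤ t.length
    · have hx : k + j ∈ pvOcc t tag := (pvOcc_mem t tag _).2 ⟨hle, hj⟩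
      have := hall _ hx
      simp at this
    · have htag : tag = [] := by
        rw [List.drop_eq_nil_of_le (by omega)] at hj
        exact List.prefix_nil.1 hj
      subst htag
      have hx : t.length ∈ pvOcc t [] := (pvOcc_mem t _ _).2 ⟨le_refl _, List.nil_prefix⟩
      have := hall _ hx
      simp at this
      omega

-- text.find(tag, k) points at the first occurrence position ≥ k
lemma pvFind_eq_head (t tag : List Char) (k : Nat) (hk : k ≤ t.length)
    {o : Nat} {rest : List Nat}
    (hd : (pvOcc t tag).dropWhile (fun x => decide (x < k)) = o :: rest) :
    PySem.Chars.findFrom t tag (k : Int) = (o : Int) := by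
  have hko : ¬ o < k := by
    have := @List.head?_dropWhile_not _ (fun x => decide (x < k)) (pvOcc t tag)
    rw [hd] at this
    simpa using this
  have homem : o ∈ pvOcc t tag := by
    have : o ∈ (pvOcc t tag).dropWhile (fun x => decide (x < k)) := by simp [hd]
    exact (List.dropWhile_sublist _).mem this
  have hne : PySem.Chars.findFrom t tag (k : Int) ≠ -1 := by
    intro hc
    rw [pvFind_eq_neg_one t tag k hk] at hc
    rw [hd] at hc
    simp at hc
  obtain ⟨hkr, hpre, hmin⟩ := PySem.Chars.findFrom_natCast_spec t tag k hk hne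
  set r := PySem.Chars.findFrom t tag (k : Int) with hr
  have hrn : r ≤ t.length := by
    rw [hr, PySem.Chars.findFrom_natCast t tag k hk]
    have := PySem.Chars.find_le_length (List.drop k t) tag
    split <;> simp_all [List.length_drop] <;> omega
  have hrmem : r.toNat ∈ pvOcc t tag := by
    refine (pvOcc_mem t tag _).2 ⟨by omega, hpre⟩
  -- o ≤ r.toNat : o is minimal among occurrence positions ≥ k
  have hole : o ≤ r.toNat := by
    by_contra hlt
    have hsplit := List.takeWhile_append_dropWhile (p := fun x => decide (x < k))
        (l := pvOcc t tag)
    have hrmem' : r.toNat ∈ List.takeWhile (fun x => decide (x < k)) (pvOcc t tag) ++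
        List.dropWhile (fun x => decide (x < k)) (pvOcc t tag) := by rw [hsplit]; exact hrmem
    rcases List.mem_append.1 hrmem' with hin | hin
    · have := List.mem_takeWhile_imp hin
      simp at this
      omega
    · rw [hd] at hin
      rcases List.mem_cons.1 hin with h | hin
      · omega
      · have hsor : (o :: rest).Pairwise (· < ·) := by
          rw [← hd]
          exact List.Pairwise.sublist (List.dropWhile_sublist _) (pvOcc_sorted t tag)
        have := (List.pairwise_cons.1 hsor).1 _ hin
        omega
  have hrle : r.toNat ≤ o := by
    by_contra hlt
    exact hmin o (by omega) (by omega) ((pvOcc_mem t tag o).1 homem).2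
  have : r.toNat = o := le_antisymm hrle hole
  omega

-- marking range(a, a+k) one index at a time equals one slice assignment
lemma pvMark_eq_slice_aux (k : Nat) : ∀ (a : Nat) (mask : List Int), a + k ≤ mask.length →
    pvMarkA mask (a : Int) ((a + k : Nat) : Int) = pvSetSlice mask a (a + k) := by
  induction k with
  | zero =>
    intro a mask h
    simp [pvMarkA, pvSetSlice, PySem.List.pyRange]
  | succ k ih =>
    intro a mask h
    have hcons : PySem.List.pyRange (a : Int) ((a + (k+1) : Nat) : Int) =
        (a : Int) :: PySem.List.pyRange ((a : Int) + 1) ((a + (k+1) : Nat) : Int) := by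
      exact PySem.List.pyRange_one_cons (by push_cast; omega)
    have hlen : a < mask.length := by omega
    rw [pvMarkA, hcons]
    simp only [List.foldl_cons, Int.toNat_natCast]
    have : ((a : Int) + 1) = ((a + 1 : Nat) : Int) := by push_cast; ring
    rw [this]
    have : ((a + (k + 1) : Nat) : Int) = (((a + 1) + k : Nat) : Int) := by push_cast; ring
    rw [this]
    have hrec := ih (a + 1) (mask.set a 1) (by simp; omega)
    rw [pvMarkA] at hrec
    rw [hrec]
    -- now pure take/replicate/drop algebra
    show pvSetSlice (mask.set a 1) (a+1) ((a+1)+k) = pvSetSlice mask a (a+(k+1))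
    unfold pvSetSlice
    rw [List.take_set, List.drop_set, if_pos (by omega)]
    rw [List.set_eq_take_cons_drop 1 (by simp [List.length_take]; omega)]
    simp [List.take_take, List.replicate_succ]
    omega

lemma pvMark_eq_slice (a b : Nat) (mask : List Int) (hab : a ≤ b) (hb : b ≤ mask.length) :
    pvMarkA mask (a : Int) (b : Int) = pvSetSlice mask a b := by
  have := pvMark_eq_slice_aux (b - a) a mask (by omega)
  rwa [Nat.add_sub_cancel' hab] at this

lemma pvSetSlice_length (mask : List Int) (a b : Nat) (hab : a ≤ b) (hb : b ≤ mask.length) :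
    (pvSetSlice mask a b).length = mask.length := by
  simp [pvSetSlice]
  omega

-- B's loop skips leading opens below cur
lemma pvLoopB_dropWhile (olen clen n : Nat) (os closes : List Nat) (cur : Nat) (mask : List Int) :
    pvLoopB olen clen n os closes cur mask =
      pvLoopB olen clen n (os.dropWhile (fun x => decide (x < cur))) closes cur mask := by
  induction os with
  | nil => rfl
  | cons o os ih =>
    by_cases h : o < cur
    · rw [List.dropWhile_cons_of_pos (by simpa using h)]
      rw [show pvLoopB olen clen n (o :: os) closes cur mask
            = pvLoopB olen clen n os closes cur mask by simp [pvLoopB, h]]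
      exact ih
    · rw [List.dropWhile_cons_of_neg (by simpa using h)]

-- the main simulation: A's find-loop state (start_index) versus B's merge state
lemma pvMain (t otag ctag : List Char) (hpre : 1 ≤ otag.length + ctag.length) :
    ∀ (fuel s : Nat) (os closes : List Nat) (mask : List Int),
    mask.length = t.length → s ≤ t.length → t.length + 1 ≤ fuel + s →
    os <:+ pvOcc t otag → (∀ y ∈ pvOcc t otag, y ∉ os → y < s) →
    closes <:+ pvOcc t ctag → (∀ y ∈ pvOcc t ctag, y ∉ closes → y < s) →
    pvLoopA t otag ctag fuel (s : Int) mask =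
      pvLoopB otag.length ctag.length t.length os closes s mask := by
  intro fuel
  induction fuel with
  | zero => intro s os closes mask _ hs hf _ _ _ _; omega
  | succ fuel ih =>
    intro s os closes mask hlen hs hf hossuf hosout hcssuf hcsout
    rw [pvLoopB_dropWhile]
    have hosdw : os.dropWhile (fun x => decide (x < s)) =
        (pvOcc t otag).dropWhile (fun x => decide (x < s)) :=
      (pvDropWhile_suffix_eq _ hossuf (pvOcc_nodup t otag)
        (fun y hy hn => by simpa using hosout y hy hn)).symm
    rw [hosdw]
    simp only [pvLoopA]
    cases hcase : (pvOcc t otag).dropWhile (fun x => decide (x < s)) with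
    | nil =>
      have hop : PySem.Chars.findFrom t otag (s : Int) = -1 :=
        (pvFind_eq_neg_one t otag s hs).2 hcase
      rw [hop, if_pos rfl]
      rfl
    | cons o rest =>
      have hop : PySem.Chars.findFrom t otag (s : Int) = (o : Int) :=
        pvFind_eq_head t otag s hs hcase
      have homem : o ∈ pvOcc t otag := by
        have : o ∈ (pvOcc t otag).dropWhile (fun x => decide (x < s)) := by simp [hcase]
        exact (List.dropWhile_sublist _).mem this
      have hso : s ≤ o := by
        have := @List.head?_dropWhile_not _ (fun x => decide (x < s)) (pvOcc t otag)
        rw [hcase] at this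
        simpa using this
      have holen : o + otag.length ≤ t.length := pvOcc_le t otag homem
      have hcsd : closes.dropWhile (fun c => decide (c < o + otag.length)) =
          (pvOcc t ctag).dropWhile (fun c => decide (c < o + otag.length)) :=
        (pvDropWhile_suffix_eq _ hcssuf (pvOcc_nodup t ctag)
          (fun y hy hn => by
            have := hcsout y hy hn
            simp
            omega)).symm
      rw [hop, if_neg (by omega)]
      have hcast : ((o : Int) + (otag.length : Int)) = ((o + otag.length : Nat) : Int) := by
        push_cast
        ring
      rw [hcast]
      -- B takes the o-branch: ¬ o < s
      rw [show pvLoopB otag.length ctag.length t.length (o :: rest) closes s mask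
            = (match closes.dropWhile (fun c => decide (c < o + otag.length)) with
               | [] => pvSetSlice mask o t.length
               | c :: cs => pvLoopB otag.length ctag.length t.length rest (c :: cs)
                              (c + ctag.length) (pvSetSlice mask o (c + ctag.length)))
          from by rw [pvLoopB, if_neg (by omega)]]
      rw [hcsd]
      cases hccase : (pvOcc t ctag).dropWhile (fun c => decide (c < o + otag.length)) with
      | nil =>
        have hcp : PySem.Chars.findFrom t ctag ((o + otag.length : Nat) : Int) = -1 :=
          (pvFind_eq_neg_one t ctag _ holen).2 hccase
        rw [hcp, if_pos rfl]
        exact pvMark_eq_slice o t.length mask (by omega) (by omega)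
      | cons c cs =>
        have hcp : PySem.Chars.findFrom t ctag ((o + otag.length : Nat) : Int) = (c : Int) :=
          pvFind_eq_head t ctag _ holen hccase
        have hcmem : c ∈ pvOcc t ctag := by
          have : c ∈ (pvOcc t ctag).dropWhile (fun x => decide (x < o + otag.length)) := by
            simp [hccase]
          exact (List.dropWhile_sublist _).mem this
        have hoc : o + otag.length ≤ c := by
          have := @List.head?_dropWhile_not _ (fun x => decide (x < o + otag.length))
            (pvOcc t ctag)
          rw [hccase] at this
          simpa using this
        have hclen : c + ctag.length ≤ t.length := pvOcc_le t ctag hcmem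
        rw [hcp, if_neg (by omega)]
        have hcast2 : ((c : Int) + (ctag.length : Int)) = ((c + ctag.length : Nat) : Int) := by
          push_cast
          ring
        rw [hcast2]
        have hmark : pvMarkA mask (o : Int) ((c + ctag.length : Nat) : Int) =
            pvSetSlice mask o (c + ctag.length) :=
          pvMark_eq_slice o (c + ctag.length) mask (by omega) (by omega)
        rw [hmark]
        -- recurse via the induction hypothesis
        have hosdec : os.dropWhile (fun x => decide (x < s)) = o :: rest := by
          rw [hosdw, hcase]
        have hcsdec : closes.dropWhile (fun c' => decide (c' < o + otag.length)) = c :: cs := by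
          rw [hcsd, hccase]
        apply ih (c + ctag.length) rest (c :: cs) (pvSetSlice mask o (c + ctag.length))
        · rw [pvSetSlice_length mask o (c + ctag.length) (by omega) (by omega), hlen]
        · omega
        · omega
        · -- rest <:+ pvOcc t otag
          exact List.IsSuffix.trans (List.suffix_cons o rest) (hcase ▸ List.dropWhile_suffix _)
        · intro y hy hyn
          by_cases hyos : y ∈ os
          · have hy2 : y ∈ os.takeWhile (fun x => decide (x < s)) ++ (o :: rest) := by
              rw [← hosdec, List.takeWhile_append_dropWhile]
              exact hyos
            rcases List.mem_append.1 hy2 with hin | hin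
            · have := List.mem_takeWhile_imp hin
              simp at this
              omega
            · rcases List.mem_cons.1 hin with rfl | hin
              · omega
              · exact absurd hin hyn
          · have := hosout y hy hyos
            omega
        · -- c :: cs <:+ pvOcc t ctag
          exact List.IsSuffix.trans (hcsdec ▸ List.dropWhile_suffix _) hcssuf
        · intro y hy hyn
          by_cases hycl : y ∈ closes
          · have hy2 : y ∈ closes.takeWhile (fun c' => decide (c' < o + otag.length))
                ++ (c :: cs) := by
              rw [← hcsdec, List.takeWhile_append_dropWhile]
              exact hycl
            rcases List.mem_append.1 hy2 with hin | hin
            · have := List.mem_takeWhile_imp hin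
              simp at this
              omega
            · exact absurd hin hyn
          · have := hcsout y hy hycl
            omega

-- ===== VERDICT (by name: the statement is the Claim_ definition above) =====
theorem get_bigmodel_mask_spec : Claim_equal_get_bigmodel_mask := by
  intro text open_tag close_tag _ hpre
  unfold Spec_get_bigmodel_mask get_bigmodel_mask get_bigmodel_mask_alt
  have hpre' : 1 ≤ open_tag.toList.length + close_tag.toList.length := by
    rcases hpre with h | h
    · have : open_tag.toList ≠ [] := by
        simpa [String.toList_eq_nil_iff] using h
      have := List.length_pos_iff.2 this
      omega
    · have : close_tag.toList ≠ [] := by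
        simpa [String.toList_eq_nil_iff] using h
      have := List.length_pos_iff.2 this
      omega
  rw [show ((0 : Int) = ((0 : Nat) : Int)) from rfl]
  exact pvMain text.toList open_tag.toList close_tag.toList hpre'
    (text.toList.length + 1) 0 _ _ _ (by simp) (by omega) (by omega)
    (List.suffix_refl _) (by simp) (List.suffix_refl _) (by simp)
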